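-- pv_equiv track=rewrite | github.com/RuseGame/RuseBackend | game.py | _validate_moves
-- ===== SOURCE A (Python) =====
-- ALIASES = ("Pink", "Green", "Blue", "White", "Orange")
--
-- MOVE_TYPES = ("send", "spoof", "wiretap", "ambush")
--
-- def _validate_moves(mover_alias, move_list):
--     action_points = 4
--     other_players = [a for a in ALIASES if a != mover_alias]
--     for move in move_list:
--         move_type = move.get("move_type")
--         if move_type in MOVE_TYPES:
--             if move_type == "send":
--                 send_from = move.get("from")
--                 send_to = move.get("to")
--                 if send_from != mover_alias or send_to not in other_players:
--                     return False
--                 action_points -= 1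
--             elif move_type == "spoof":
--                 spoofed_from = move.get("from")
--                 spoofed_to = move.get("to")
--                 spoofer = move.get("spoofer")
--                 if spoofer != mover_alias or spoofed_to == spoofed_from:
--                     return False
--                 if spoofed_to not in ALIASES or spoofed_from not in ALIASES:
--                     return False
--                 action_points -= 2
--             elif move_type == "wiretap":
--                 target = move.get("target")
--                 tapper = move.get("tapper")
--                 direction = move.get("direction")
--                 if tapper != mover_alias or target not in ALIASES:
--                     return False
--                 if direction != "incoming" and direction != "outgoing":
--                     return False
--                 action_points -= 3
--             elif move_type == "ambush":
--                 target = move.get("target")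
--                 attacker = move.get("attacker")
--                 if attacker != mover_alias or target not in other_players:
--                     return False
--                 action_points -= 4
--         else:
--             return False
--     if action_points < 0:
--         return False
--     return True
-- ===== SOURCE B (Python) =====
-- ALIASES = ("Pink", "Green", "Blue", "White", "Orange")
--
-- # which fields identify a move of each type (key layout), and its cost
-- _FIELDS = {"send": ("from", "to"), "spoof": ("spoofer", "from", "to"),
--            "wiretap": ("tapper", "target", "direction"),
--            "ambush": ("attacker", "target")}
-- _COST = {"send": 1, "spoof": 2, "wiretap": 3, "ambush": 4}
--
--
-- def _validate_moves(mover_alias, move_list):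
--     # Precompute the (finite) set of ALL legal move keys for this mover,
--     # then judge each move by a single set-membership test.
--     legal = set()
--     for a in ALIASES:
--         if a != mover_alias:
--             legal.add(("send", mover_alias, a))
--             legal.add(("ambush", mover_alias, a))
--     for f in ALIASES:
--         for t in ALIASES:
--             if t != f:
--                 legal.add(("spoof", mover_alias, f, t))
--     for tg in ALIASES:
--         for d in ("incoming", "outgoing"):
--             legal.add(("wiretap", mover_alias, tg, d))
--
--     total = 0
--     for move in move_list:
--         mt = move.get("move_type")
--         fields = _FIELDS.get(mt)
--         if fields is None:
--             return False
--         if (mt,) + tuple(move.get(f) for f in fields) not in legal: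
--             return False
--         total += _COST[mt]
--     return total <= 4
-- ===== Notes on version B (the rewrite author's own statement) =====
-- stated objective: alternative
-- what changed: Instead of A's per-move-type conditional field checks inside one budget-decrementing loop, B precomputes the finite set of every legal move key for the mover (generated combinatorially from ALIASES) and judges each move by a single set-membership lookup of its key tuple, summing table costs against the 4-point budget.
import Mathlib
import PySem

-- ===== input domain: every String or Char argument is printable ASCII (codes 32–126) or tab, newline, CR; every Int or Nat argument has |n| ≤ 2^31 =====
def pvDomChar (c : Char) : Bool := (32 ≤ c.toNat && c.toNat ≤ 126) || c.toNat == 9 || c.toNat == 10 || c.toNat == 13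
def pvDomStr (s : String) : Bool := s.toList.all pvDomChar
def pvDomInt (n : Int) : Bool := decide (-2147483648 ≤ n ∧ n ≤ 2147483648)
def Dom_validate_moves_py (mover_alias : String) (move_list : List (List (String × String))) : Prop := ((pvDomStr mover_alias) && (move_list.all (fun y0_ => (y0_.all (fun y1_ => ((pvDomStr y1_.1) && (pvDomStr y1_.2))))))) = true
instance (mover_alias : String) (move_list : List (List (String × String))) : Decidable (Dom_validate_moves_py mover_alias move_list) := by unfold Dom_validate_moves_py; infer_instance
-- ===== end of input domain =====

-- B replaces A's per-type conditional field checks by a precomputed set of all legal move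
-- keys for the mover plus a membership test per move (objective: alternative); same values.

-- dict.get(k): first-match lookup in the association list (moves carry string values only)
def mget (m : List (String × String)) (k : String) : Option String :=
  (m.find? (fun p => p.1 == k)).map (·.2)

def pvALIASES : List String := ["Pink", "Green", "Blue", "White", "Orange"]

-- ===== PORT A =====
-- A's loop: action_points accumulator, early `return False`, final `action_points < 0` check
def goA (mover : String) (other : List String) :
    List (List (String × String)) → Int → Bool
  | [], ap => !decide (ap < 0)
  | move :: rest, ap =>
    let mt := mget move "move_type"
    if [some "send", some "spoof", some "wiretap", some "ambush"].contains mt then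
      if mt == some "send" then
        if mget move "from" != some mover || !((other.map some).contains (mget move "to")) then
          false
        else goA mover other rest (ap - 1)
      else if mt == some "spoof" then
        if mget move "spoofer" != some mover || mget move "to" == mget move "from" then false
        else if !((pvALIASES.map some).contains (mget move "to")) ||
                !((pvALIASES.map some).contains (mget move "from")) then false
        else goA mover other rest (ap - 2)
      else if mt == some "wiretap" then
        if mget move "tapper" != some mover ||
           !((pvALIASES.map some).contains (mget move "target")) then false
        else if mget move "direction" != some "incoming" &&
                mget move "direction" != some "outgoing" then false
        else goA mover other rest (ap - 3)
      else if mt == some "ambush" then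
        if mget move "attacker" != some mover ||
           !((other.map some).contains (mget move "target")) then false
        else goA mover other rest (ap - 4)
      else goA mover other rest ap   -- unreachable: mt is one of the four
    else false

def validate_moves_py (mover_alias : String) (move_list : List (List (String × String))) : Bool :=
  let other_players := pvALIASES.filter (fun a => a != mover_alias)
  goA mover_alias other_players move_list 4

-- ===== PORT B =====
-- _FIELDS and _COST dispatch tables
def fieldsB : PySem.Dict String (List String) :=
  PySem.Dict.ofList [("send", ["from", "to"]), ("spoof", ["spoofer", "from", "to"]),
    ("wiretap", ["tapper", "target", "direction"]), ("ambush", ["attacker", "target"])]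

def costB : PySem.Dict String Int :=
  PySem.Dict.ofList [("send", 1), ("spoof", 2), ("wiretap", 3), ("ambush", 4)]

-- the three set-building loops of B (a move key is the tuple (move_type, relevant fields…))
def legalB (mover : String) : PySem.Set (List (Option String)) :=
  let s1 := pvALIASES.foldl (fun s a =>
    if a != mover then
      PySem.Set.add (PySem.Set.add s [some "send", some mover, some a])
        [some "ambush", some mover, some a]
    else s) PySem.Set.empty
  let s2 := pvALIASES.foldl (fun s f =>
    pvALIASES.foldl (fun s t =>
      if t != f then PySem.Set.add s [some "spoof", some mover, some f, some t] else s) s) s1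
  pvALIASES.foldl (fun s tg =>
    (["incoming", "outgoing"] : List String).foldl (fun s d =>
      PySem.Set.add s [some "wiretap", some mover, some tg, some d]) s) s2

-- B's single pass: key lookup in the legal set, cost from the table, final budget test
def goB (legal : PySem.Set (List (Option String))) :
    List (List (String × String)) → Int → Bool
  | [], total => decide (total ≤ 4)
  | move :: rest, total =>
    match mget move "move_type" with
    | none => false
    | some mt =>
      match PySem.Dict.get? fieldsB mt with
      | none => false
      | some spec =>
        if PySem.Set.contains legal (some mt :: spec.map (mget move)) then
          goB legal rest (total + PySem.Dict.getD costB mt 0)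
        else false

def validate_moves_py_alt (mover_alias : String) (move_list : List (List (String × String))) : Bool :=
  goB (legalB mover_alias) move_list 0

-- ===== PRECONDITION & SPEC =====
def Spec_validate_moves_py (mover_alias : String) (move_list : List (List (String × String))) (out : Bool) : Prop := out = validate_moves_py_alt mover_alias move_list
instance (mover_alias : String) (move_list : List (List (String × String))) (out : Bool) : Decidable (Spec_validate_moves_py mover_alias move_list out) := by unfold Spec_validate_moves_py; infer_instance

-- ===== CLAIM (what is proved, stated in full; the proofs are below) =====
def Claim_equal_validate_moves_py : Prop := ∀ (mover_alias : String) (move_list : List (List (String × String))), Dom_validate_moves_py mover_alias move_list → Spec_validate_moves_py mover_alias move_list (validate_moves_py mover_alias move_list)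

-- ===== LEMMAS AND PROOFS =====

-- membership across the send/ambush-building fold
theorem mem_fold1 (mover : String) (k : List (Option String)) :
    ∀ (l : List String) (s : PySem.Set (List (Option String))),
    (k ∈ l.foldl (fun s a =>
      if a != mover then
        PySem.Set.add (PySem.Set.add s [some "send", some mover, some a])
          [some "ambush", some mover, some a]
      else s) s) ↔
    k ∈ s ∨ ∃ a ∈ l, a ≠ mover ∧
      (k = [some "send", some mover, some a] ∨ k = [some "ambush", some mover, some a]) := by
  intro l
  induction l with
  | nil => simp
  | cons a l ih =>
    intro s
    by_cases h : a = mover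
    · rw [List.foldl_cons, if_neg (by simp [h])]
      rw [ih]; simp [h]
    · rw [List.foldl_cons, if_pos (by simp [h])]
      rw [ih]
      simp [PySem.Set.mem_add, h, or_assoc]

-- membership across the inner spoof fold (fixed f)
theorem mem_fold2i (mover f : String) (k : List (Option String)) :
    ∀ (l : List String) (s : PySem.Set (List (Option String))),
    (k ∈ l.foldl (fun s t =>
      if t != f then PySem.Set.add s [some "spoof", some mover, some f, some t] else s) s) ↔
    k ∈ s ∨ ∃ t ∈ l, t ≠ f ∧ k = [some "spoof", some mover, some f, some t] := by
  intro l
  induction l with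
  | nil => simp
  | cons t l ih =>
    intro s
    by_cases h : t = f
    · rw [List.foldl_cons, if_neg (by simp [h])]
      rw [ih]; simp [h]
    · rw [List.foldl_cons, if_pos (by simp [h])]
      rw [ih]
      simp [PySem.Set.mem_add, h, or_assoc]

-- membership across the outer spoof fold
theorem mem_fold2 (mover : String) (k : List (Option String)) :
    ∀ (l : List String) (s : PySem.Set (List (Option String))),
    (k ∈ l.foldl (fun s f =>
      pvALIASES.foldl (fun s t =>
        if t != f then PySem.Set.add s [some "spoof", some mover, some f, some t] else s) s) s) ↔
    k ∈ s ∨ ∃ f ∈ l, ∃ t ∈ pvALIASES, t ≠ f ∧ k = [some "spoof", some mover, some f, some t] := by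
  intro l
  induction l with
  | nil => simp
  | cons f l ih =>
    intro s
    rw [List.foldl_cons, ih, mem_fold2i]
    simp [or_assoc]

-- membership across the wiretap fold
theorem mem_fold3 (mover : String) (k : List (Option String)) :
    ∀ (l : List String) (s : PySem.Set (List (Option String))),
    (k ∈ l.foldl (fun s tg =>
      (["incoming", "outgoing"] : List String).foldl (fun s d =>
        PySem.Set.add s [some "wiretap", some mover, some tg, some d]) s) s) ↔
    k ∈ s ∨ ∃ tg ∈ l, ∃ d ∈ (["incoming", "outgoing"] : List String),
      k = [some "wiretap", some mover, some tg, some d] := by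
  intro l
  induction l with
  | nil => simp
  | cons tg l ih =>
    intro s
    rw [List.foldl_cons, ih]
    simp [PySem.Set.mem_add, or_assoc]

theorem mem_legalB (mover : String) (k : List (Option String)) :
    k ∈ legalB mover ↔
      (∃ a ∈ pvALIASES, a ≠ mover ∧
        (k = [some "send", some mover, some a] ∨ k = [some "ambush", some mover, some a])) ∨
      (∃ f ∈ pvALIASES, ∃ t ∈ pvALIASES, t ≠ f ∧ k = [some "spoof", some mover, some f, some t]) ∨
      (∃ tg ∈ pvALIASES, ∃ d ∈ (["incoming", "outgoing"] : List String),
        k = [some "wiretap", some mover, some tg, some d]) := by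
  unfold legalB
  rw [mem_fold3, mem_fold2, mem_fold1]
  simp [PySem.Set.empty, or_assoc]

-- ground table lookups (the dispatch tables are literals)
theorem fields_send : PySem.Dict.get? fieldsB "send" = some ["from", "to"] := rfl
theorem fields_spoof : PySem.Dict.get? fieldsB "spoof" = some ["spoofer", "from", "to"] := rfl
theorem fields_wiretap : PySem.Dict.get? fieldsB "wiretap" = some ["tapper", "target", "direction"] := rfl
theorem fields_ambush : PySem.Dict.get? fieldsB "ambush" = some ["attacker", "target"] := rfl
theorem fields_none (mt : String) (e1 : mt ≠ "send") (e2 : mt ≠ "spoof")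
    (e3 : mt ≠ "wiretap") (e4 : mt ≠ "ambush") : PySem.Dict.get? fieldsB mt = none := by
  rw [PySem.Dict.get?_eq_none_iff_not_mem_keys,
      show fieldsB.keys = ["send", "spoof", "wiretap", "ambush"] from rfl]
  simp [e1, e2, e3, e4]
theorem cost_send : PySem.Dict.getD costB "send" 0 = 1 := rfl
theorem cost_spoof : PySem.Dict.getD costB "spoof" 0 = 2 := rfl
theorem cost_wiretap : PySem.Dict.getD costB "wiretap" 0 = 3 := rfl
theorem cost_ambush : PySem.Dict.getD costB "ambush" 0 = 4 := rfl

-- per-type membership in the legal set, as the boolean conditions A tests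
theorem contains_send (mover : String) (x y : Option String) :
    PySem.Set.contains (legalB mover) [some "send", x, y] =
      (x == some mover && ((pvALIASES.filter (fun a => a != mover)).map some).contains y) := by
  rw [Bool.eq_iff_iff, PySem.Set.contains_iff, mem_legalB]
  simp [List.mem_filter, eq_comm (b := y)]
  tauto

theorem contains_ambush (mover : String) (x y : Option String) :
    PySem.Set.contains (legalB mover) [some "ambush", x, y] =
      (x == some mover && ((pvALIASES.filter (fun a => a != mover)).map some).contains y) := by
  rw [Bool.eq_iff_iff, PySem.Set.contains_iff, mem_legalB]
  simp [List.mem_filter, eq_comm (b := y)]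
  tauto

theorem contains_spoof (mover : String) (x f t : Option String) :
    PySem.Set.contains (legalB mover) [some "spoof", x, f, t] =
      (x == some mover && t != f &&
        (pvALIASES.map some).contains t && (pvALIASES.map some).contains f) := by
  rw [Bool.eq_iff_iff, PySem.Set.contains_iff, mem_legalB]
  simp [bne_iff_ne]
  constructor
  · rintro ⟨f', hf', t', ht', hne, hx, hfe, hte⟩
    refine ⟨⟨⟨hx, ?_⟩, t', ht', hte.symm⟩, f', hf', hfe.symm⟩
    rw [hfe, hte]
    exact fun h => hne (Option.some.inj h)
  · rintro ⟨⟨⟨hx, hne⟩, t', ht', hte⟩, f', hf', hfe⟩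
    refine ⟨f', hf', t', ht', ?_, hx, hfe.symm, hte.symm⟩
    intro h
    apply hne
    rw [← hte, ← hfe, h]

theorem contains_wiretap (mover : String) (x tg d : Option String) :
    PySem.Set.contains (legalB mover) [some "wiretap", x, tg, d] =
      (x == some mover && (pvALIASES.map some).contains tg &&
        (d == some "incoming" || d == some "outgoing")) := by
  rw [Bool.eq_iff_iff, PySem.Set.contains_iff, mem_legalB]
  simp [eq_comm (b := tg)]
  constructor
  · rintro ⟨a, ha, ⟨hx, htg, hd⟩ | ⟨hx, htg, hd⟩⟩
    · exact ⟨⟨hx, a, ha, htg⟩, Or.inl hd⟩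
    · exact ⟨⟨hx, a, ha, htg⟩, Or.inr hd⟩
  · rintro ⟨⟨hx, a, ha, htg⟩, hd | hd⟩
    · exact ⟨a, ha, Or.inl ⟨hx, htg, hd⟩⟩
    · exact ⟨a, ha, Or.inr ⟨hx, htg, hd⟩⟩

-- the middle form both loops are reduced to: a per-move validity bit and a per-move cost
def validM (mover : String) (other : List String) (move : List (String × String)) : Bool :=
  let mt := mget move "move_type"
  if mt == some "send" then
    mget move "from" == some mover && (other.map some).contains (mget move "to")
  else if mt == some "spoof" then
    mget move "spoofer" == some mover && mget move "to" != mget move "from" &&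
      (pvALIASES.map some).contains (mget move "to") &&
      (pvALIASES.map some).contains (mget move "from")
  else if mt == some "wiretap" then
    mget move "tapper" == some mover && (pvALIASES.map some).contains (mget move "target") &&
      [some "incoming", some "outgoing"].contains (mget move "direction")
  else if mt == some "ambush" then
    mget move "attacker" == some mover && (other.map some).contains (mget move "target")
  else false

def costM (move : List (String × String)) : Int :=
  let mt := mget move "move_type"
  if mt == some "send" then 1
  else if mt == some "spoof" then 2
  else if mt == some "wiretap" then 3
  else if mt == some "ambush" then 4
  else 0

-- A's loop in middle form
theorem goA_eq (mover : String) (other : List String)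
    (ms : List (List (String × String))) (ap : Int) :
    goA mover other ms ap =
      (ms.all (validM mover other) && decide (0 ≤ ap - (ms.map costM).sum)) := by
  have memb : ∀ (l : List String) (o : Option String),
      (∀ x ∈ l, ¬ some x = o) ↔ ¬ (∃ a ∈ l, some a = o) := by
    intro l o
    push_neg
    exact Iff.rfl
  induction ms generalizing ap with
  | nil =>
    simp only [goA, List.all_nil, Bool.true_and, List.map_nil, List.sum_nil]
    rw [← decide_not]
    exact decide_eq_decide.mpr (by omega)
  | cons m rest ih =>
    by_cases h1 : mget m "move_type" = some "send"
    · simp only [goA, validM, costM, List.all_cons, List.map_cons, List.sum_cons, h1]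
      by_cases hf : mget m "from" = some mover
      · by_cases ht : ∃ a ∈ other, some a = mget m "to"
        · simp [hf, ht, memb, ih]
          congr 1
          exact decide_eq_decide.mpr (by omega)
        · simp [hf, ht, memb]
      · simp [hf]
    · by_cases h2 : mget m "move_type" = some "spoof"
      · simp only [goA, validM, costM, List.all_cons, List.map_cons, List.sum_cons, h1, h2]
        by_cases hs : mget m "spoofer" = some mover
        · by_cases heq : mget m "to" = mget m "from"
          · simp [hs, heq]
          · by_cases ht : ∃ a ∈ pvALIASES, some a = mget m "to"
            · by_cases hf : ∃ a ∈ pvALIASES, some a = mget m "from"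
              · have hb : (mget m "to" != mget m "from") = true := bne_iff_ne.mpr heq
                simp [hs, heq, ht, hf, memb, ih, hb]
                congr 1
                exact decide_eq_decide.mpr (by omega)
              · simp [hs, heq, ht, hf, memb]
            · simp [hs, heq, ht, memb]
        · simp [hs]
      · by_cases h3 : mget m "move_type" = some "wiretap"
        · simp only [goA, validM, costM, List.all_cons, List.map_cons, List.sum_cons, h1, h2, h3]
          by_cases htp : mget m "tapper" = some mover
          · by_cases htg : ∃ a ∈ pvALIASES, some a = mget m "target"
            · by_cases hd1 : mget m "direction" = some "incoming"
              · simp [htp, htg, hd1, memb, ih]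
                congr 1
                exact decide_eq_decide.mpr (by omega)
              · by_cases hd2 : mget m "direction" = some "outgoing"
                · simp [htp, htg, hd1, hd2, memb, ih]
                  congr 1
                  exact decide_eq_decide.mpr (by omega)
                · simp [htp, htg, hd1, hd2, memb]
            · simp [htp, htg, memb]
          · simp [htp]
        · by_cases h4 : mget m "move_type" = some "ambush"
          · simp only [goA, validM, costM, List.all_cons, List.map_cons, List.sum_cons, h1, h2, h3, h4]
            by_cases ha : mget m "attacker" = some mover
            · by_cases ht : ∃ a ∈ other, some a = mget m "target"
              · simp [ha, ht, memb, ih]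
                congr 1
                exact decide_eq_decide.mpr (by omega)
              · simp [ha, ht, memb]
            · simp [ha]
          · simp [goA, validM, h1, h2, h3, h4]

-- B's loop in middle form
theorem goB_eq (mover : String) (ms : List (List (String × String))) :
    ∀ total : Int,
    goB (legalB mover) ms total =
      (ms.all (validM mover (pvALIASES.filter (fun a => a != mover))) &&
        decide ((ms.map costM).sum + total ≤ 4)) := by
  induction ms with
  | nil =>
    intro total
    simp only [goB, List.all_nil, Bool.true_and, List.map_nil, List.sum_nil]
    exact decide_eq_decide.mpr (by omega)
  | cons m rest ih =>
    intro total
    cases hmt : mget m "move_type" with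
    | none => simp [goB, validM, hmt]
    | some mt =>
      by_cases h1 : mt = "send"
      · subst h1
        simp only [goB, validM, costM, hmt, fields_send, cost_send, List.map_cons, List.map_nil,
          List.all_cons, List.sum_cons, contains_send]
        have hd : decide ((List.map costM rest).sum + (total + 1) ≤ 4) =
            decide (1 + (List.map costM rest).sum + total ≤ 4) :=
          decide_eq_decide.mpr (by omega)
        simp [ih, hd, Bool.and_assoc, Bool.beq_eq_decide_eq, bne]
      · by_cases h2 : mt = "spoof"
        · subst h2
          simp only [goB, validM, costM, hmt, fields_spoof, cost_spoof, List.map_cons, List.map_nil,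
            List.all_cons, List.sum_cons, contains_spoof]
          have hd : decide ((List.map costM rest).sum + (total + 2) ≤ 4) =
              decide (2 + (List.map costM rest).sum + total ≤ 4) :=
            decide_eq_decide.mpr (by omega)
          simp [ih, hd, Bool.and_assoc, Bool.beq_eq_decide_eq, bne]
        · by_cases h3 : mt = "wiretap"
          · subst h3
            simp only [goB, validM, costM, hmt, fields_wiretap, cost_wiretap, List.map_cons,
              List.map_nil, List.all_cons, List.sum_cons, contains_wiretap]
            have hd : decide ((List.map costM rest).sum + (total + 3) ≤ 4) =
                decide (3 + (List.map costM rest).sum + total ≤ 4) :=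
              decide_eq_decide.mpr (by omega)
            simp [ih, hd, Bool.and_assoc, Bool.beq_eq_decide_eq, bne]
          · by_cases h4 : mt = "ambush"
            · subst h4
              simp only [goB, validM, costM, hmt, fields_ambush, cost_ambush, List.map_cons,
                List.map_nil, List.all_cons, List.sum_cons, contains_ambush]
              have hd : decide ((List.map costM rest).sum + (total + 4) ≤ 4) =
                  decide (4 + (List.map costM rest).sum + total ≤ 4) :=
                decide_eq_decide.mpr (by omega)
              simp [ih, hd, Bool.and_assoc, Bool.beq_eq_decide_eq, bne]
            · simp [goB, validM, hmt, fields_none mt h1 h2 h3 h4, h1, h2, h3, h4]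

-- ===== VERDICT (by name: the statement is the Claim_ definition above) =====
theorem validate_moves_py_spec : Claim_equal_validate_moves_py := by
  intro mover ml _
  unfold Spec_validate_moves_py validate_moves_py validate_moves_py_alt
  rw [goA_eq, goB_eq]
  congr 1
  exact decide_eq_decide.mpr (by omega)
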